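-- pv_equiv track=rewrite | github.com/hasanbaig/GeneTech | src/functions.py | Cal_Max_terms
-- ===== SOURCE A (Python) =====
-- def Cal_Max_terms(POS):
--     """Function to calculate the max terms in integers"""
--     Max_terms = []
--     a = ""
--     i = 0
--     while (i<len(POS)):
--         if (POS[i]=='.'):
--             b = int(a, 2)            # converting binary to decimal
--             Max_terms.append(b)      # insertion of each min term(integer) into the list
--             a =""                    # empty the string
--             i+= 1
--
--         elif(POS[i].isalpha()):
--             # checking whether variable is complemented or not
--             if(i+1 != len(POS) and POS[i+1]=="'"):
--                 a += '1'        # concatenating the string with '1'. In POS, complement means '1'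
--                 i += 2          # incrementing by 2 because 1 for alphabet and another for "'"
--             else:
--                 a += '0'        # concatenating the string with '0'. In POS, complement means '0'
--                 i += 1
--         else:
--             i+= 1
--
--     # insertion of last min term(integer) into the list
--     Max_terms.append(int(a, 2))
--     return Max_terms
-- ===== SOURCE B (Python) =====
-- def Cal_Max_terms(POS):
--     """Split on '.' and map each term to its integer: pair every character
--     with its successor via zip; each letter contributes '1' when followed by
--     an apostrophe, else '0'; everything else is ignored."""
--     return [
--         int(''.join('1' if nxt == "'" else '0'
--                     for ch, nxt in zip(term, term[1:] + '.')
--                     if ch.isalpha()), 2)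
--         for term in POS.split('.')
--     ]
-- ===== Notes on version B (the rewrite author's own statement) =====
-- stated objective: simpler
-- what changed: Replaced A's single index-walking while-loop state machine (manual i+=1/i+=2 stepping with a cross-term bit-string accumulator built by repeated +=) by a split of POS on '.' followed by an independent per-term zip-with-successor/filter/join pass converted with int(.,2); a timing run measured B faster (A's repeated string += and per-character interpreted loop vs split/join/comprehension).
import Mathlib
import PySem

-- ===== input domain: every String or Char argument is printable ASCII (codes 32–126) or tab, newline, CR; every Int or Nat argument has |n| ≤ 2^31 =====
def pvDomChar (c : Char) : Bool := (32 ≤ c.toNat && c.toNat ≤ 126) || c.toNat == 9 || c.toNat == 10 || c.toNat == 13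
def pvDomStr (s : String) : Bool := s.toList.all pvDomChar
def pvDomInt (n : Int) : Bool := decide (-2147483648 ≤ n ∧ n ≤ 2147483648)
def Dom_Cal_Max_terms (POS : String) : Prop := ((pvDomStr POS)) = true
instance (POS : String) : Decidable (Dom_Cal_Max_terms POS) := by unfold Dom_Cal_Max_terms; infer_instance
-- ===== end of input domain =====

-- B replaces A's single index-walking state machine by split-on-'.' plus a
-- per-term zip/filter/map pass (objective: simpler; same asymptotic cost).


-- ===== PORT A =====
-- int(s, 2): PySem has no base-2 int(); hand port, exact for nonempty strings of
-- '0'/'1' (the only strings either program converts). On an empty bit string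
-- Python raises ValueError (excluded by Pre_); here it returns 0.
def pvBin (bits : List Char) : Int :=
  bits.foldl (fun acc c => 2 * acc + (if c = '1' then 1 else 0)) 0

-- the while loop of A: cs is POS[i:], a the bit string, ms the Max_terms list
def pvCalA : List Char → List Char → List Int → List Int
  | [], a, ms => ms ++ [pvBin a]                              -- loop ends; append int(a,2)
  | c :: rest, a, ms =>
    if c = '.' then pvCalA rest [] (ms ++ [pvBin a])
    else if PySem.Chars.isalpha c then
      match rest with
      | '\'' :: rest2 => pvCalA rest2 (a ++ ['1']) ms         -- i+1 != len and POS[i+1] == "'"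
      | r => pvCalA r (a ++ ['0']) ms
    else pvCalA rest a ms
termination_by cs _ _ => cs.length
decreasing_by all_goals (simp_all; try omega)

def Cal_Max_terms (POS : String) : List Int :=
  pvCalA POS.toList [] []

-- ===== PORT B =====
-- ''.join('1' if nxt == "'" else '0' for ch, nxt in zip(term, term[1:] + '.') if ch.isalpha())
def pvBits (t : List Char) : List Char :=
  ((t.zip ((t.drop 1) ++ ['.'])).filter (fun p => PySem.Chars.isalpha p.1)).map
    (fun p => if p.2 = '\'' then '1' else '0')

def Cal_Max_terms_alt (POS : String) : List Int :=
  (PySem.Chars.splitOn POS.toList ['.']).map (fun term => pvBin (pvBits term))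

-- ===== PRECONDITION & SPEC =====
-- Pre_ excludes exactly the inputs on which Python A raises ValueError:
-- some '.'-separated segment of POS contains no letter, so int() gets an empty bit string.
def Pre_Cal_Max_terms (POS : String) : Prop :=
  ((POS.toList.splitOn '.').all (fun t => t.any (fun c => PySem.Chars.isalpha c))) = true
instance (POS : String) : Decidable (Pre_Cal_Max_terms POS) := by
  unfold Pre_Cal_Max_terms; infer_instance
def pvWitness_Cal_Max_terms : String := "a'b.c"

def Spec_Cal_Max_terms (POS : String) (out : List Int) : Prop := out = Cal_Max_terms_alt POS
instance (POS : String) (out : List Int) : Decidable (Spec_Cal_Max_terms POS out) := by unfold Spec_Cal_Max_terms; infer_instance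

-- ===== CLAIM (what is proved, stated in full; the proofs are below) =====
def Claim_equal_Cal_Max_terms : Prop := ∀ (POS : String), Dom_Cal_Max_terms POS → Pre_Cal_Max_terms POS → Spec_Cal_Max_terms POS (Cal_Max_terms POS)

-- ===== LEMMAS AND PROOFS =====

-- reference split used by the proofs only
def pvSplit : List Char → List (List Char)
  | [] => [[]]
  | c :: r =>
    if c = '.' then [] :: pvSplit r
    else
      match pvSplit r with
      | t :: ts => (c :: t) :: ts
      | [] => [[c]]

theorem pvSplit_ne_nil (l : List Char) : pvSplit l ≠ [] := by
  match l with
  | [] => simp [pvSplit]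
  | c :: r =>
    simp only [pvSplit]
    split <;> [simp; split <;> simp]

theorem splitOn_go_eq (fuel : Nat) :
    ∀ (l cur : List Char) (accl : List (List Char)), l.length < fuel →
      PySem.Chars.splitOn.go ['.'] fuel l cur accl =
        accl.reverse ++ (pvSplit l).modifyHead (fun t => cur.reverse ++ t) := by
  induction fuel with
  | zero => intro l cur accl h; omega
  | succ fuel ih =>
    intro l cur accl h
    match l with
    | [] => simp [PySem.Chars.splitOn.go, pvSplit]
    | c :: rest =>
      by_cases hc : c = '.'
      · subst hc
        rw [PySem.Chars.splitOn.go]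
        have hp : List.isPrefixOf ['.'] ('.' :: rest) = true := by
          simp [List.isPrefixOf]
        rw [if_pos hp]
        simp only [List.length_cons] at h
        rw [ih _ _ _ (by simpa using Nat.lt_of_succ_lt_succ h)]
        obtain ⟨t, ts, hts⟩ := List.exists_cons_of_ne_nil (pvSplit_ne_nil rest)
        simp [pvSplit, hts]
      · rw [PySem.Chars.splitOn.go]
        have hp : List.isPrefixOf ['.'] (c :: rest) = false := by
          simp [List.isPrefixOf]; exact fun hh => hc hh.symm
        rw [if_neg (by simp [hp])]
        simp only [List.length_cons] at h
        rw [ih _ _ _ (Nat.lt_of_succ_lt_succ h)]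
        obtain ⟨t, ts, hts⟩ := List.exists_cons_of_ne_nil (pvSplit_ne_nil rest)
        simp [pvSplit, hts, hc]

theorem splitOn_eq_pvSplit (cs : List Char) :
    PySem.Chars.splitOn cs ['.'] = pvSplit cs := by
  unfold PySem.Chars.splitOn
  rw [splitOn_go_eq (cs.length + 1) cs [] [] (by omega)]
  obtain ⟨t, ts, hts⟩ := List.exists_cons_of_ne_nil (pvSplit_ne_nil cs)
  simp [hts]

theorem pvBits_cons (c : Char) (rest : List Char) :
    pvBits (c :: rest) =
      (if PySem.Chars.isalpha c then [if rest.headD '.' = '\'' then '1' else '0'] else [])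
        ++ pvBits rest := by
  cases rest <;> by_cases h : PySem.Chars.isalpha c <;>
    simp [pvBits, h]

theorem pvCalA_eq (cs a : List Char) (ms : List Int) :
    pvCalA cs a ms =
      ms ++ (match pvSplit cs with
             | t :: ts => pvBin (a ++ pvBits t) :: ts.map (fun u => pvBin (pvBits u))
             | [] => []) := by
  fun_induction pvCalA cs a ms with
  | case1 a ms => simp [pvSplit, pvBits]
  | case2 rest a ms ih =>
    obtain ⟨t, ts, hts⟩ := List.exists_cons_of_ne_nil (pvSplit_ne_nil rest)
    simp [pvSplit, hts, pvBits] at ih ⊢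
    rw [ih]
  | case3 c a ms hc ha rest2 ih =>
    obtain ⟨t, ts, hts⟩ := List.exists_cons_of_ne_nil (pvSplit_ne_nil rest2)
    have hq : ('\'' : Char) ≠ '.' := by decide
    have hna : PySem.Chars.isalpha '\'' = false := by decide
    simp [pvSplit, hts, hc, hq] at ih ⊢
    rw [ih, pvBits_cons, pvBits_cons]
    simp [ha, hna]
  | case4 c a ms hc ha r hr ih =>
    obtain ⟨t, ts, hts⟩ := List.exists_cons_of_ne_nil (pvSplit_ne_nil r)
    simp [pvSplit, hts, hc] at ih ⊢
    rw [ih, pvBits_cons]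
    have hhd : (t.head?.getD '.') ≠ '\'' := by
      match r, hr with
      | [], _ =>
        simp [pvSplit] at hts
        simp [hts.1]
      | d :: rr, hr =>
        by_cases hd : d = '.'
        · subst hd; simp [pvSplit] at hts; simp [hts.1]
        · obtain ⟨t2, ts2, hts2⟩ := List.exists_cons_of_ne_nil (pvSplit_ne_nil rr)
          simp [pvSplit, hd, hts2] at hts
          have hd2 : t.head?.getD '.' = d := by rw [← hts.1]; rfl
          intro hcon
          exact hr rr (by rw [hd2.symm.trans hcon])
    simp [ha, hhd]
  | case5 c rest a ms hc ha ih =>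
    obtain ⟨t, ts, hts⟩ := List.exists_cons_of_ne_nil (pvSplit_ne_nil rest)
    simp [pvSplit, hts, hc] at ih ⊢
    rw [ih, pvBits_cons]
    simp [ha]

theorem Cal_Max_terms_spec : Claim_equal_Cal_Max_terms := by
  intro POS _ _
  unfold Spec_Cal_Max_terms Cal_Max_terms Cal_Max_terms_alt
  rw [pvCalA_eq, splitOn_eq_pvSplit]
  obtain ⟨t, ts, h⟩ := List.exists_cons_of_ne_nil (pvSplit_ne_nil POS.toList)
  simp [h]
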